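-- pv_equiv track=rewrite | github.com/Kobe972/piano_fingering_generator | RL.py | difficulty_single_syll
-- ===== SOURCE A (Python) =====
-- def difficulty_single_syll(fingering):
--     #此函数评价单个音符的指法所用
--     result=0
--     first=0
--     second=1
--     while second<len(fingering):
--         if fingering[first]==0:
--             first+=1
--             second=max(second,first+1)
--             continue
--         if fingering[second]==0:
--             second+=1
--             continue
--         result+=abs(fingering[second]-fingering[first]-(second-first))
--         first+=1
--         second=max(second,first+1)
--     return result
-- ===== SOURCE B (Python) =====
-- def difficulty_single_syll(fingering):
--     nz = [(i, v) for i, v in enumerate(fingering) if v != 0]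
--     result = 0
--     for (i1, v1), (i2, v2) in zip(nz, nz[1:]):
--         result += abs(v2 - v1 - (i2 - i1))
--     return result
-- ===== Notes on version B (the rewrite author's own statement) =====
-- stated objective: simpler
-- what changed: Replaces the two-pointer while loop with max-resets and skip branches by a build-then-pairwise pass: filter the nonzero (index, value) pairs once with enumerate, then sum abs(v2-v1-(i2-i1)) over adjacent pairs via zip.
import Mathlib
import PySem

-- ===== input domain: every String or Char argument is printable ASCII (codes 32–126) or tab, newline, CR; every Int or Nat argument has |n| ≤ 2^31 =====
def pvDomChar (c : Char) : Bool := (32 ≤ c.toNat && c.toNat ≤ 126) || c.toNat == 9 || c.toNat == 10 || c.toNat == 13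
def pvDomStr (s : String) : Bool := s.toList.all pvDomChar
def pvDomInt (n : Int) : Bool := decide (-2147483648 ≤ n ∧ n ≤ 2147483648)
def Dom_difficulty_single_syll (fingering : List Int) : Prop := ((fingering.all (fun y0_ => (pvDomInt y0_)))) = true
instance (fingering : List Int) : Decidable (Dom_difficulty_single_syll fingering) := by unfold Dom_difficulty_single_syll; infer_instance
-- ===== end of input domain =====

-- B replaces A's two-pointer while loop by filtering the nonzero (index, value)
-- pairs once and summing over adjacent pairs (objective: simpler).

-- ===== PORT A =====
-- Literal transliteration of A's while loop.  In every reachable state first < second < len,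
-- so the list reads are genuine in-range Python indexing (indices are nonnegative, in range);
-- getD is exact there.
def dsLoop (f : List Int) (fuel first second : Nat) (result : Int) : Int :=
  match fuel with
  | 0 => result   -- never reached: fuel bounds the loop's decreasing measure
  | fuel + 1 =>
    if second < f.length then
      if f.getD first 0 = 0 then
        dsLoop f fuel (first + 1) (max second (first + 2)) result
      else if f.getD second 0 = 0 then
        dsLoop f fuel first (second + 1) result
      else
        dsLoop f fuel (first + 1) (max second (first + 2))
          (result + |f.getD second 0 - f.getD first 0 - ((second : Int) - (first : Int))|)
    else result

def difficulty_single_syll (fingering : List Int) : Int :=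
  dsLoop fingering (2 * fingering.length + 2) 0 1 0

-- ===== PORT B =====
def difficulty_single_syll_alt (fingering : List Int) : Int :=
  let nz := (PySem.List.enumerate fingering 0).filter (fun p => p.2 != 0)
  (nz.zip nz.tail).foldl (fun acc pq => acc + |pq.2.2 - pq.1.2 - (pq.2.1 - pq.1.1)|) 0

-- ===== PRECONDITION & SPEC =====
def Spec_difficulty_single_syll (fingering : List Int) (out : Int) : Prop := out = difficulty_single_syll_alt fingering
instance (fingering : List Int) (out : Int) : Decidable (Spec_difficulty_single_syll fingering out) := by unfold Spec_difficulty_single_syll; infer_instance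

-- ===== CLAIM (what is proved, stated in full; the proofs are below) =====
def Claim_equal_difficulty_single_syll : Prop := ∀ (fingering : List Int), Dom_difficulty_single_syll fingering → Spec_difficulty_single_syll fingering (difficulty_single_syll fingering)

-- ===== LEMMAS AND PROOFS =====

-- sum over adjacent pairs of an (index, value) list
def pairSum : List (Int × Int) → Int
  | (i1, v1) :: (i2, v2) :: rest => |v2 - v1 - (i2 - i1)| + pairSum ((i2, v2) :: rest)
  | _ => 0

theorem foldl_zip_tail (l : List (Int × Int)) (acc : Int) :
    (l.zip l.tail).foldl (fun acc pq => acc + |pq.2.2 - pq.1.2 - (pq.2.1 - pq.1.1)|) acc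
      = acc + pairSum l := by
  induction l generalizing acc with
  | nil => simp [pairSum]
  | cons a t ih =>
    cases t with
    | nil => simp [pairSum]
    | cons b r =>
      obtain ⟨i1, v1⟩ := a
      obtain ⟨i2, v2⟩ := b
      simp only [List.tail_cons, List.zip_cons_cons, List.foldl_cons]
      rw [show ((i2, v2) :: r).zip r = ((i2, v2) :: r).zip (((i2, v2) :: r).tail) by rfl]
      rw [ih]
      simp [pairSum]
      ring

-- the nonzero (index, value) pairs of f at positions ≥ a
def nzFrom (f : List Int) (a : Nat) : List (Int × Int) :=
  if a < f.length then
    (if f.getD a 0 ≠ 0 then [((a : Int), f.getD a 0)] else []) ++ nzFrom f (a + 1)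
  else []
termination_by f.length - a

theorem nzFrom_of_ge (f : List Int) (a : Nat) (h : f.length ≤ a) : nzFrom f a = [] := by
  unfold nzFrom; simp [Nat.not_lt.mpr h]

theorem nzFrom_skip (f : List Int) (a b : Nat) (hab : a ≤ b)
    (hz : ∀ j, a ≤ j → j < b → f.getD j 0 = 0) : nzFrom f a = nzFrom f b := by
  induction b with
  | zero =>
    have : a = 0 := by omega
    rw [this]
  | succ b ih =>
    rcases Nat.lt_or_ge a (b + 1) with h | h
    · have hab' : a ≤ b := by omega
      rw [ih hab' (fun j hj1 hj2 => hz j hj1 (by omega))]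
      by_cases hb : b < f.length
      · rw [nzFrom, if_pos hb, if_neg (not_not_intro (hz b hab' (by omega)))]
        simp
      · rw [nzFrom_of_ge f b (by omega), nzFrom_of_ge f (b + 1) (by omega)]
    · have : a = b + 1 := by omega
      rw [this]
  
theorem filter_enumerate_drop (f : List Int) (a : Nat) (ha : a ≤ f.length) :
    (PySem.List.enumerate (f.drop a) (a : Int)).filter (fun p => p.2 != 0) = nzFrom f a := by
  induction h : f.length - a generalizing a with
  | zero =>
    have : f.length ≤ a := by omega
    rw [List.drop_eq_nil_of_le this, nzFrom_of_ge f a this]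
    simp [PySem.List.enumerate]
  | succ k ih =>
    have hlt : a < f.length := by omega
    have hdrop : f.drop a = f[a] :: f.drop (a + 1) := List.drop_eq_getElem_cons hlt
    rw [hdrop, PySem.List.enumerate_cons]
    have hgd : f.getD a 0 = f[a] := List.getD_eq_getElem f 0 hlt
    have hrec := ih (a + 1) (by omega) (by omega)
    push_cast at hrec
    rw [nzFrom]
    by_cases hv : f[a] = 0
    · simp [hlt, hv, hrec]
    · simp [hlt, hv, hrec]

-- A's loop computes the pairwise sum over the nonzero entries from `first` on,
-- given the loop invariant (first < second, only zeros strictly between them).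
theorem dsLoop_eq (f : List Int) (fuel first second : Nat) (result : Int)
    (hfuel : (f.length - second) + (f.length - first) < fuel)
    (hfs : first < second)
    (hz : ∀ j, first < j → j < second → f.getD j 0 = 0) :
    dsLoop f fuel first second result = result + pairSum (nzFrom f first) := by
  induction fuel generalizing first second result with
  | zero => omega
  | succ fuel ih =>
    rw [dsLoop]
    by_cases hlt : second < f.length
    · rw [if_pos hlt]
      by_cases h0 : f.getD first 0 = 0
      · -- f[first] = 0
        rw [if_pos h0]
        rw [ih (first + 1) (max second (first + 2)) result (by omega) (by omega)
          (by intro j hj1 hj2; exact hz j (by omega) (by omega))]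
        have hfn : first < f.length := by omega
        rw [show nzFrom f first = nzFrom f (first + 1) by
          rw [nzFrom, if_pos hfn, if_neg (not_not_intro h0)]; simp]
      · rw [if_neg h0]
        by_cases hs : f.getD second 0 = 0
        · -- f[second] = 0
          rw [if_pos hs]
          exact ih first (second + 1) result (by omega) (by omega) (by
            intro j hj1 hj2
            rcases Nat.lt_or_ge j second with h | h
            · exact hz j hj1 h
            · have : j = second := by omega
              rw [this]; exact hs)
        · -- pair branch
          rw [if_neg hs]
          rw [ih (first + 1) (max second (first + 2)) _ (by omega) (by omega)
            (by intro j hj1 hj2; exact hz j (by omega) (by omega))]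
          have hfn : first < f.length := by omega
          have h1 : nzFrom f first = ((first : Int), f.getD first 0) :: nzFrom f (first + 1) := by
            rw [nzFrom, if_pos hfn, if_pos h0]
            simp
          have h2 : nzFrom f (first + 1) = nzFrom f second :=
            nzFrom_skip f (first + 1) second (by omega)
              (fun j hj1 hj2 => hz j (by omega) hj2)
          have h3 : nzFrom f second = ((second : Int), f.getD second 0) :: nzFrom f (second + 1) := by
            rw [nzFrom, if_pos hlt, if_pos hs]
            simp
          rw [h1, h2, h3, pairSum]
          ring
    · rw [if_neg hlt]
      have h2 : nzFrom f (first + 1) = nzFrom f second :=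
        nzFrom_skip f (first + 1) second (by omega)
          (fun j hj1 hj2 => hz j (by omega) hj2)
      have h3 : nzFrom f second = [] := nzFrom_of_ge f second (by omega)
      by_cases hfn : first < f.length
      · rw [show nzFrom f first
            = (if f.getD first 0 ≠ 0 then [((first : Int), f.getD first 0)] else [])
                ++ nzFrom f (first + 1) from by rw [nzFrom, if_pos hfn]]
        rw [h2, h3, List.append_nil]
        by_cases hv : f.getD first 0 = 0
        · rw [if_neg (not_not_intro hv)]
          simp [pairSum]
        · rw [if_pos hv]
          simp [pairSum]
      · rw [nzFrom_of_ge f first (by omega)]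
        simp [pairSum]

-- ===== VERDICT (by name: the statement is the Claim_ definition above) =====
theorem difficulty_single_syll_spec : Claim_equal_difficulty_single_syll := by
  intro fingering _
  unfold Spec_difficulty_single_syll difficulty_single_syll difficulty_single_syll_alt
  rw [dsLoop_eq fingering (2 * fingering.length + 2) 0 1 0 (by omega) (by omega) (by intro j h1 h2; omega)]
  have hf : (PySem.List.enumerate fingering 0).filter (fun p => p.2 != 0)
      = nzFrom fingering 0 := by
    have := filter_enumerate_drop fingering 0 (by omega)
    simpa using this
  rw [hf, foldl_zip_tail]
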